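-- pv_equiv track=rewrite | github.com/hswek/algorithm | 프로그래머스/3/12987. 숫자 게임/숫자 게임.py | solution
-- ===== SOURCE A (Python) =====
-- import bisect
-- from collections import deque
--
-- def solution(A, B):
--     answer = 0
--     A.sort()
--     B.sort()
--     a=deque(A)
--     b=deque(B)
--     while len(a):
--         #if a[0]>b[-1]:
--         #    a.popleft()
--         #    b.pop()
--         #   continue
--         tmp=a.popleft()
--         where=bisect.bisect_right(b,tmp)
--         if where==len(b):
--             b.popleft()
--             continue
--         if b[where]>tmp:
--             b.remove(b[where])
--             answer+=1
--         elif b[where]==tmp: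
--             b.popleft()
--
--     return answer
-- ===== SOURCE B (Python) =====
-- def solution(A, B):
--     # sort copies of both hands, then one linear two-pointer scan counting wins
--     sa = sorted(A)
--     sb = sorted(B)
--     ans = 0
--     i = 0
--     for x in sb:
--         if i < len(sa) and x > sa[i]:
--             ans += 1
--             i += 1
--     return ans
-- ===== Notes on version B (the rewrite author's own statement) =====
-- stated objective: faster
-- what changed: Replaces A's per-element deque loop with bisect + linear-time deque.remove (O(n^2) overall, plus in-place sorting of the arguments) by a single two-pointer scan over the two sorted copies.
import Mathlib
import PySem

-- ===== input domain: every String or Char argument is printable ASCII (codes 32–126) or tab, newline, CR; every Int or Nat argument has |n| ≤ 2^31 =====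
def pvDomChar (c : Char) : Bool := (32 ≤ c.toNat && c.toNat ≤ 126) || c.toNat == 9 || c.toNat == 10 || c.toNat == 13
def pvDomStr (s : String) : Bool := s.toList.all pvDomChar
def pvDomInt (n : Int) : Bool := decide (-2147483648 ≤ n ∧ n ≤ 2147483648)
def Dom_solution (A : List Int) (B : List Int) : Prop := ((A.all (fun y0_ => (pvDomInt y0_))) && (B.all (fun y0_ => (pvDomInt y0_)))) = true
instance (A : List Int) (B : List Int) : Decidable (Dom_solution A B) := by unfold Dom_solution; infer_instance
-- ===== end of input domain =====

-- B replaces A's bisect-and-remove deque loop by a single two-pointer scan over the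
-- two sorted copies (claimed faster: asymptotic). Equivalence is about the RETURN value
-- only: Python A sorts both argument lists in place, B does not mutate its arguments.

-- ===== PORT A =====
-- the while-loop: state is (deque a, deque b, answer); each iteration pops a's head
def loopA : List Int → List Int → Int → Int
  | [], _, answer => answer
  | tmp :: a, b, answer =>
    let w := PySem.List.bisectRight b tmp
    if w = b.length then
      loopA a (b.drop 1) answer        -- b.popleft(); an empty b is Python's IndexError, outside Pre_
    else
      match PySem.List.pyGet? b (w : Int) with
      | none => answer                 -- unreachable: w < len(b)
      | some bw =>
        if tmp < bw then               -- b[where] > tmp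
          loopA a ((PySem.List.remove? b bw).getD b) (answer + 1)
        else if bw = tmp then
          loopA a (b.drop 1) answer
        else
          loopA a b answer

def solution (A : List Int) (B : List Int) : Int :=
  loopA (PySem.List.sorted A (fun v => v)) (PySem.List.sorted B (fun v => v)) 0

-- ===== PORT B =====
def solution_alt (A : List Int) (B : List Int) : Int :=
  let sa := PySem.List.sorted A (fun v => v)
  let sb := PySem.List.sorted B (fun v => v)
  (sb.foldl (fun (st : Int × Nat) x =>
      if h : st.2 < sa.length then
        if sa[st.2] < x then (st.1 + 1, st.2 + 1) else st
      else st) ((0 : Int), (0 : Nat))).1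

-- ===== PRECONDITION & SPEC =====
-- Pre_ excludes exactly the inputs on which Python A raises: when len(A) > len(B) the
-- deque b empties before a does and b.popleft() raises IndexError.
def Pre_solution (A : List Int) (B : List Int) : Prop := A.length ≤ B.length
instance (A : List Int) (B : List Int) : Decidable (Pre_solution A B) := by unfold Pre_solution; infer_instance
def pvWitness_solution : List Int × List Int := ([5, 1, 3], [2, 6, 8])

def Spec_solution (A : List Int) (B : List Int) (out : Int) : Prop := out = solution_alt A B
instance (A : List Int) (B : List Int) (out : Int) : Decidable (Spec_solution A B out) := by unfold Spec_solution; infer_instance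

-- ===== CLAIM (what is proved, stated in full; the proofs are below) =====
def Claim_equal_solution : Prop := ∀ (A : List Int) (B : List Int), Dom_solution A B → Pre_solution A B → Spec_solution A B (solution A B)

-- ===== LEMMAS AND PROOFS =====

-- the abstract two-pointer count: scan the second list, matching against the first
def tp : List Int → List Int → Int
  | _, [] => 0
  | [], _ :: b => tp [] b
  | z :: a, x :: b => if z < x then 1 + tp a b else tp (z :: a) b

theorem tp_nil (b : List Int) : tp [] b = 0 := by
  induction b with
  | nil => rfl
  | cons x b ih => simpa [tp] using ih

theorem tp_zero (a b : List Int) (h : ∀ x ∈ b, ∀ z ∈ a, x ≤ z) : tp a b = 0 := by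
  induction b with
  | nil => cases a <;> rfl
  | cons x b ih =>
    cases a with
    | nil => exact tp_nil _
    | cons z a' =>
      have hx : ¬ z < x := not_lt.mpr (h x (by simp) z (by simp))
      simp only [tp, if_neg hx]
      exact ih (fun y hy z hz => h y (by simp [hy]) z hz)

theorem tp_skip (L R a : List Int) (h : ∀ x ∈ L, ∀ z ∈ a, x ≤ z) :
    tp a (L ++ R) = tp a R := by
  induction L with
  | nil => rfl
  | cons x L ih =>
    cases a with
    | nil => rw [tp_nil, tp_nil]
    | cons z a' =>
      have hx : ¬ z < x := not_lt.mpr (h x (by simp) z (by simp))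
      simp only [List.cons_append, tp, if_neg hx]
      exact ih (fun y hy z hz => h y (by simp [hy]) z hz)

theorem loopA_eq (a : List Int) : ∀ (b : List Int) (ans : Int),
    a.Pairwise (· ≤ ·) → b.Pairwise (· ≤ ·) → loopA a b ans = ans + tp a b := by
  induction a with
  | nil => intro b ans _ _; simp [loopA, tp_nil]
  | cons t a' ih =>
    intro b ans ha hb
    have ha' : a'.Pairwise (· ≤ ·) := ha.of_cons
    have hta : ∀ z ∈ a', t ≤ z := fun z hz => List.rel_of_pairwise_cons ha hz
    obtain ⟨hwle, hlt_le, hge_gt⟩ := PySem.List.bisectRight_spec b t hb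
    by_cases hweq : PySem.List.bisectRight b t = b.length
    · -- all of b is ≤ t: both sides discard everything, no more wins
      have hble : ∀ x ∈ b, x ≤ t := by
        intro x hx
        obtain ⟨j, hj, rfl⟩ := List.mem_iff_getElem.mp hx
        exact hlt_le j hj (hweq ▸ hj)
      have h1 : tp (t :: a') b = 0 := by
        refine tp_zero _ _ (fun x hx z hz => ?_)
        rcases List.mem_cons.mp hz with rfl | hz
        · exact hble x hx
        · exact le_trans (hble x hx) (hta z hz)
      have h2 : tp a' (b.drop 1) = 0 := by
        refine tp_zero _ _ (fun x hx z hz => ?_)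
        exact le_trans (hble x (List.mem_of_mem_drop hx)) (hta z hz)
      have hbd : (b.drop 1).Pairwise (· ≤ ·) :=
        List.Pairwise.sublist (List.drop_sublist 1 b) hb
      simp only [loopA]
      rw [if_pos hweq, ih _ ans ha' hbd, h1, h2]
    · -- b[w] is the smallest b-card beating t: remove it, count a win
      have hwlt : PySem.List.bisectRight b t < b.length := lt_of_le_of_ne hwle hweq
      obtain ⟨v, hv⟩ : ∃ v, b[PySem.List.bisectRight b t] = v := ⟨_, rfl⟩
      have hget : PySem.List.pyGet? b ((PySem.List.bisectRight b t : Nat) : Int) = some v := by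
        rw [PySem.List.pyGet?_natCast, List.getElem?_eq_getElem hwlt, hv]
      have htw : t < v := hv ▸ hge_gt _ hwlt le_rfl
      have htake : ∀ x ∈ b.take (PySem.List.bisectRight b t), x ≤ t := by
        intro x hx
        obtain ⟨j, hj, rfl⟩ := List.mem_iff_getElem.mp hx
        simp only [List.length_take, lt_min_iff] at hj
        rw [List.getElem_take]
        exact hlt_le j hj.2 hj.1
      have hsplit : b = b.take (PySem.List.bisectRight b t)
          ++ v :: b.drop (PySem.List.bisectRight b t + 1) := by
        conv_lhs => rw [← List.take_append_drop (PySem.List.bisectRight b t) b]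
        rw [← List.getElem_cons_drop hwlt, hv]
      have hrem : (PySem.List.remove? b v).getD b
          = b.take (PySem.List.bisectRight b t) ++ b.drop (PySem.List.bisectRight b t + 1) := by
        rw [PySem.List.remove?_eq_some_erase b v (hv ▸ List.getElem_mem hwlt), Option.getD_some]
        have hnot : v ∉ b.take (PySem.List.bisectRight b t) := fun hmem =>
          absurd (htake _ hmem) (not_le.mpr htw)
        conv_lhs => rw [hsplit]
        rw [List.erase_append_right _ hnot, List.erase_cons_head]
      have hLR : (b.take (PySem.List.bisectRight b t)
          ++ b.drop (PySem.List.bisectRight b t + 1)).Pairwise (· ≤ ·) := by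
        rw [← List.eraseIdx_eq_take_drop_succ]
        exact List.Pairwise.sublist (List.eraseIdx_sublist b _) hb
      have hskipL : ∀ x ∈ b.take (PySem.List.bisectRight b t), ∀ z ∈ a', x ≤ z :=
        fun x hx z hz => le_trans (htake x hx) (hta z hz)
      have hskipL' : ∀ x ∈ b.take (PySem.List.bisectRight b t), ∀ z ∈ t :: a', x ≤ z := by
        intro x hx z hz
        rcases List.mem_cons.mp hz with rfl | hz
        · exact htake x hx
        · exact hskipL x hx z hz
      have hrhs : tp (t :: a') b
          = 1 + tp a' (b.take (PySem.List.bisectRight b t) ++ b.drop (PySem.List.bisectRight b t + 1)) := by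
        conv_lhs => rw [hsplit]
        rw [tp_skip _ _ _ hskipL', tp_skip _ _ _ hskipL]
        simp [tp, htw]
      simp only [loopA]
      rw [if_neg hweq, hget]
      simp only
      rw [if_pos htw, hrem, ih _ (ans + 1) ha' hLR, hrhs]
      ring

theorem foldB (sa : List Int) (sb : List Int) : ∀ (ans : Int) (i : Nat), i ≤ sa.length →
    (sb.foldl (fun (st : Int × Nat) x =>
      if h : st.2 < sa.length then
        if sa[st.2] < x then (st.1 + 1, st.2 + 1) else st
      else st) (ans, i)).1 = ans + tp (sa.drop i) sb := by
  induction sb with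
  | nil => intro ans i _; simp [tp]
  | cons x sb ih =>
    intro ans i hi
    by_cases h : i < sa.length
    · have hd : sa.drop i = sa[i] :: sa.drop (i + 1) := (List.getElem_cons_drop h).symm
      by_cases hx : sa[i] < x
      · simp only [List.foldl_cons, dif_pos h, ih (ans + 1) (i + 1) h, hd, tp,
          if_pos hx]
        ring
      · simp only [List.foldl_cons, dif_pos h, ih ans i hi, hd, tp, if_neg hx]
    · have hie : i = sa.length := le_antisymm hi (not_lt.mp h)
      have hde : sa.drop i = [] := by simp [hie]
      simp only [List.foldl_cons, dif_neg h, ih ans i hi, hde, tp]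

-- ===== VERDICT (by name: the statement is the Claim_ definition above) =====
theorem solution_spec : Claim_equal_solution := by
  intro A B _ _
  unfold Spec_solution solution solution_alt
  have ha := PySem.List.sorted_pairwise A (fun v : Int => v)
  have hb := PySem.List.sorted_pairwise B (fun v : Int => v)
  rw [loopA_eq _ _ 0 ha hb, foldB _ _ 0 0 (Nat.zero_le _)]
  simp
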